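-- pv_equiv track=rewrite | github.com/Yoxem/findarray30code | findarray30code/__init__.py | rawcode2truecode
-- ===== SOURCE A (Python) =====
-- def rawcode2truecode(raw):
--     #1^ = Q, 1- = A, 1v = Z, 2^ = W, 2- = S ......, 0^ = P, 0- = :, 0v = ?
--     raw_code_order = "QAZWSXEDCRFVTGBYHNUJMIK,OL.P;/"
--     true_code = ""
--     index = 0
--     for i in raw:
--         i_index = raw_code_order.index(i)
--
--         uncorrected_column = i_index // 3
--         #correct the column no. 2 -> 3; 9 -> 0
--         column = str(uncorrected_column + 1)[-1]
--         row_number = i_index % 3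
--         row = ['^','-','v'][row_number] # 0=^;1=-;2=v
--         column_and_row = column + row
--         true_code = true_code + column_and_row
--         index = index * 30 + i_index
--     index = (5-len(raw))*(30**5) + index
--     return true_code,index
-- ===== SOURCE B (Python) =====
-- def rawcode2truecode(raw):
--     # Pack the whole input into one base-30 integer first, then decode the code
--     # string back-to-front from that integer's base-30 digits via divmod and a
--     # precomputed 30-entry pair table.
--     raw_code_order = "QAZWSXEDCRFVTGBYHNUJMIK,OL.P;/"
--     pairs = [str((k // 3 + 1) % 10) + "^-v"[k % 3] for k in range(30)]
--     n = 0
--     for c in raw: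
--         n = n * 30 + raw_code_order.index(c)
--     total = (5 - len(raw)) * 30**5 + n
--     chunks = []
--     for _ in range(len(raw)):
--         n, d = divmod(n, 30)
--         chunks.append(pairs[d])
--     return "".join(reversed(chunks)), total
-- ===== Notes on version B (the rewrite author's own statement) =====
-- stated objective: alternative
-- what changed: B first packs the whole input into one base-30 integer with a bare Horner pass, then decodes the code string back-to-front from that integer's base-30 digits with divmod and a precomputed 30-entry pair table, instead of A's single fused loop that builds the string char-by-char with per-char column/row arithmetic alongside the accumulator.
import Mathlib
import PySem

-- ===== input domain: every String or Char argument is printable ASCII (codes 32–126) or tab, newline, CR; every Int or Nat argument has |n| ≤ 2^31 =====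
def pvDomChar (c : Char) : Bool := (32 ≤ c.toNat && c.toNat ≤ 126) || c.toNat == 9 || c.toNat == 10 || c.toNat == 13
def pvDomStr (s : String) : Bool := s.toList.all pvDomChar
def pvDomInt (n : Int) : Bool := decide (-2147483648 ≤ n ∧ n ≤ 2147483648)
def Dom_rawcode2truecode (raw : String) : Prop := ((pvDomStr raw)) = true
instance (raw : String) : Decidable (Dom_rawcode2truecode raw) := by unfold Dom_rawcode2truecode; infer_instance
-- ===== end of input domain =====

-- B packs the input into one base-30 integer, then decodes the code string
-- back-to-front from that integer's digits with divmod and a precomputed pair table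
-- (alternative decomposition, same cost).

-- shared constant: the keyboard order string both Pythons use
def pvOrder : List Char := "QAZWSXEDCRFVTGBYHNUJMIK,OL.P;/".toList

-- ===== PORT A =====
-- loop over raw accumulating (true_code, index); .index raises ValueError on chars
-- not in pvOrder — Pre_ excludes those, so the '.getD' defaults below are never taken inside Pre_.
def pvAloop : List Char → List Char → Int → List Char × Int
  | [], tc, idx => (tc, idx)
  | c :: rest, tc, idx =>
    let iIdx : Int := (((PySem.List.index? pvOrder c).getD 0 : Nat) : Int)
    let column : Char := ((PySem.Int.toStr (PySem.Int.floordiv iIdx 3 + 1)).toList.getLast?).getD ' '  -- str(..)[-1]; the string is nonempty so getLast?/getD is exact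
    let row : Char := (PySem.List.pyGet? ['^', '-', 'v'] (PySem.Int.mod iIdx 3)).getD ' '  -- index 0..2, always in range
    pvAloop rest (tc ++ [column, row]) (idx * 30 + iIdx)

def rawcode2truecode (raw : String) : String × Int :=
  let r := pvAloop raw.toList [] 0
  (String.ofList r.1, (5 - PySem.Str.len raw) * 30 ^ 5 + r.2)

-- ===== PORT B =====
-- pairs = [str((k // 3 + 1) % 10) + "^-v"[k % 3] for k in range(30)]
def pvPairs : List (List Char) :=
  (PySem.List.pyRange 0 30 1).map (fun k =>
    (PySem.Int.toStr (PySem.Int.mod (PySem.Int.floordiv k 3 + 1) 10)).toList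
      ++ [(PySem.List.pyGet? "^-v".toList (PySem.Int.mod k 3)).getD ' '])

-- for c in raw: n = n * 30 + raw_code_order.index(c)   (.index raises ValueError outside Pre_)
def pvBloop : List Char → Int → Int
  | [], n => n
  | c :: rest, n => pvBloop rest (n * 30 + (((PySem.List.index? pvOrder c).getD 0 : Nat) : Int))

-- for _ in range(len(raw)): n, d = divmod(n, 30); chunks.append(pairs[d])
def pvDloop : Nat → Int → List (List Char) → List (List Char)
  | 0, _, chunks => chunks
  | k + 1, n, chunks =>
    pvDloop k (PySem.Int.floordiv n 30)
      (chunks ++ [(PySem.List.pyGet? pvPairs (PySem.Int.mod n 30)).getD []])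

def rawcode2truecode_alt (raw : String) : String × Int :=
  let n := pvBloop raw.toList 0
  let total := (5 - PySem.Str.len raw) * 30 ^ 5 + n
  let chunks := pvDloop raw.toList.length n []
  (String.ofList (chunks.reverse.flatMap id), total)

-- ===== PRECONDITION & SPEC =====
-- Pre_ excludes exactly the strings containing a character outside the keyboard order,
-- on which both A and B raise ValueError in .index.
def Pre_rawcode2truecode (raw : String) : Prop := (raw.toList.all (fun c => pvOrder.contains c)) = true
instance (raw : String) : Decidable (Pre_rawcode2truecode raw) := by unfold Pre_rawcode2truecode; infer_instance
def pvWitness_rawcode2truecode : String := "Q"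

def Spec_rawcode2truecode (raw : String) (out : String × Int) : Prop := out = rawcode2truecode_alt raw
instance (raw : String) (out : String × Int) : Decidable (Spec_rawcode2truecode raw out) := by unfold Spec_rawcode2truecode; infer_instance

-- ===== CLAIM =====
def Claim_equal_rawcode2truecode : Prop := ∀ (raw : String), Dom_rawcode2truecode raw → Pre_rawcode2truecode raw → Spec_rawcode2truecode raw (rawcode2truecode raw)

-- ===== LEMMAS AND PROOFS =====

-- A-side index of a character
def pvIdx (c : Char) : Nat := (PySem.List.index? pvOrder c).getD 0

-- B's chunk for digit i
def pvPairOf (i : Nat) : List Char := (PySem.List.pyGet? pvPairs ((i : Nat) : Int)).getD []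

-- A's two emitted characters for index i
def pvPairA (i : Nat) : List Char :=
  [((PySem.Int.toStr (PySem.Int.floordiv (i : Int) 3 + 1)).toList.getLast?).getD ' ',
   (PySem.List.pyGet? ['^', '-', 'v'] (PySem.Int.mod (i : Int) 3)).getD ' ']

-- most-significant-first positional value
def pvHsum : List Nat → Int
  | [] => 0
  | i :: r => (i : Int) * 30 ^ r.length + pvHsum r

theorem pvIdx_lt (c : Char) (hc : c ∈ pvOrder) : pvIdx c < 30 := by
  unfold pvIdx
  rcases Option.isSome_iff_exists.mp ((PySem.List.index?_isSome_iff (xs := pvOrder) (v := c)).2 hc) with ⟨k, hk⟩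
  rcases PySem.List.getElem_of_index?_eq_some hk with ⟨hlt, _, _⟩
  rw [hk]
  have : pvOrder.length = 30 := by decide
  simp only [Option.getD_some]
  omega

-- B's dict lookup agrees with A's .index on every keyboard character

-- A's per-character pair equals B's table entry, for every index < 30
theorem pvPair_eq (k : Nat) (hk : k < 30) : pvPairA k = pvPairOf k := by
  have h : ∀ k : Fin 30, pvPairA (k : Nat) = pvPairOf (k : Nat) := by decide
  exact h ⟨k, hk⟩

theorem pvHsum_nonneg (l : List Nat) : 0 ≤ pvHsum l := by
  induction l with
  | nil => simp [pvHsum]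
  | cons i r ih => simp only [pvHsum]; positivity

theorem pvHsum_append_singleton (l : List Nat) (i : Nat) :
    pvHsum (l ++ [i]) = 30 * pvHsum l + i := by
  induction l with
  | nil => simp [pvHsum]
  | cons j r ih =>
    simp only [List.cons_append, pvHsum, ih, List.length_append, List.length_cons,
      List.length_nil]
    ring

-- A's loop in closed form
theorem pvAloop_eq (l : List Char) (h : ∀ c ∈ l, c ∈ pvOrder) :
    ∀ tc idx, pvAloop l tc idx
      = (tc ++ (l.map pvIdx).flatMap pvPairA, idx * 30 ^ l.length + pvHsum (l.map pvIdx)) := by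
  induction l with
  | nil => intro tc idx; simp [pvAloop, pvHsum]
  | cons c rest ih =>
    intro tc idx
    have hrest : ∀ x ∈ rest, x ∈ pvOrder := fun x hx => h x (List.mem_cons_of_mem _ hx)
    show pvAloop rest _ _ = _
    rw [ih hrest]
    have hidx : (((PySem.List.index? pvOrder c).getD 0 : Nat) : Int) = ((pvIdx c : Nat) : Int) := rfl
    simp only [hidx, List.map_cons, List.flatMap_cons, pvHsum, pvPairA,
      List.length_cons, List.length_map, List.append_assoc]
    rw [Prod.mk.injEq]
    exact ⟨rfl, by ring⟩

-- B's Horner loop in closed form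
theorem pvBloop_eq (l : List Char) (h : ∀ c ∈ l, c ∈ pvOrder) :
    ∀ n, pvBloop l n = n * 30 ^ l.length + pvHsum (l.map pvIdx) := by
  induction l with
  | nil => intro n; simp [pvBloop, pvHsum]
  | cons c rest ih =>
    intro n
    have hrest : ∀ x ∈ rest, x ∈ pvOrder := fun x hx => h x (List.mem_cons_of_mem _ hx)
    show pvBloop rest _ = _
    rw [ih hrest]
    have hidx : (((PySem.List.index? pvOrder c).getD 0 : Nat) : Int) = ((pvIdx c : Nat) : Int) := rfl
    rw [hidx]
    simp only [List.map_cons, pvHsum, List.length_cons, List.length_map]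
    ring

-- B's digit-extraction loop recovers the digits (reversed) from the positional value
theorem pvDloop_eq (idxs : List Nat) (h : ∀ i ∈ idxs, i < 30) :
    ∀ chunks, pvDloop idxs.length (pvHsum idxs) chunks = chunks ++ (idxs.map pvPairOf).reverse := by
  induction idxs using List.reverseRecOn with
  | nil => intro chunks; simp [pvDloop, pvHsum]
  | append_singleton l i ih =>
    intro chunks
    have hi : i < 30 := h i (by simp)
    have hl : ∀ j ∈ l, j < 30 := fun j hj => h j (by simp [hj])
    have hnn : 0 ≤ pvHsum l := pvHsum_nonneg l
    have hval := pvHsum_append_singleton l i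
    have hdiv : PySem.Int.floordiv (pvHsum (l ++ [i])) 30 = pvHsum l := by
      rw [PySem.Int.floordiv_eq_iff_of_pos (by omega)]
      constructor <;> [omega; (push_cast at hval ⊢; omega)]
    have hmod : PySem.Int.mod (pvHsum (l ++ [i])) 30 = ((i : Nat) : Int) := by
      have := PySem.Int.floordiv_mul_add_mod (pvHsum (l ++ [i])) 30
      rw [hdiv] at this
      omega
    rw [List.length_append, List.length_singleton]
    show pvDloop l.length _ _ = _
    rw [hdiv, hmod, ih hl]
    simp [pvPairOf, List.append_assoc]

theorem rawcode2truecode_spec : Claim_equal_rawcode2truecode := by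
  intro raw _ hpre0
  have hpre : ∀ c ∈ raw.toList, c ∈ pvOrder := by
    have h := hpre0
    unfold Pre_rawcode2truecode at h
    simpa [List.all_eq_true] using h
  show rawcode2truecode raw = rawcode2truecode_alt raw
  have hidx : ∀ i ∈ raw.toList.map pvIdx, i < 30 := by
    intro i hi
    rcases List.mem_map.mp hi with ⟨c, hc, rfl⟩
    exact pvIdx_lt c (hpre c hc)
  rw [show rawcode2truecode raw
      = (String.ofList (pvAloop raw.toList [] 0).1,
          (5 - PySem.Str.len raw) * 30 ^ 5 + (pvAloop raw.toList [] 0).2) from rfl]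
  rw [show rawcode2truecode_alt raw
      = (String.ofList ((pvDloop raw.toList.length (pvBloop raw.toList 0) []).reverse.flatMap id),
          (5 - PySem.Str.len raw) * 30 ^ 5 + pvBloop raw.toList 0) from rfl]
  rw [pvAloop_eq raw.toList hpre [] 0, pvBloop_eq raw.toList hpre 0]
  have hlen : raw.toList.length = (raw.toList.map pvIdx).length := by simp
  rw [hlen, zero_mul, zero_add, pvDloop_eq (raw.toList.map pvIdx) hidx []]
  simp only [List.nil_append, List.reverse_reverse, List.flatMap_id, Prod.mk.injEq, and_true]
  congr 1
  simp only [List.flatMap_map, List.flatten_eq_flatMap, id_eq]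
  exact List.flatMap_congr (fun a ha => pvPair_eq (pvIdx a) (pvIdx_lt a (hpre a ha)))

-- ===== VERDICT =====
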